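-- pv_equiv track=rewrite | github.com/PSSalgado/FoldKit | metrics/interface_analysis_matrix.py | _apply_custom_order
-- ===== SOURCE A (Python) =====
-- def _apply_custom_order(items: list[str], wanted: list[str]) -> list[str]:
--     """
--     Return a new list where items mentioned in wanted come first (in that order),
--     followed by any remaining items in their original order.
--     """
--     if not wanted:
--         return list(items)
--     s = set(items)
--     bad = [x for x in wanted if x not in s]
--     if bad:
--         raise ValueError(f"Unknown x-axis item(s): {', '.join(bad)}")
--     out: list[str] = []
--     seen: set[str] = set()
--     for x in wanted:
--         if x not in seen:
--             out.append(x)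
--             seen.add(x)
--     for x in items:
--         if x not in seen:
--             out.append(x)
--             seen.add(x)
--     return out
-- ===== SOURCE B (Python) =====
-- def _apply_custom_order(items: list[str], wanted: list[str]) -> list[str]:
--     """
--     Return a new list where items mentioned in wanted come first (in that order),
--     followed by any remaining items in their original order.
--     """
--     if not wanted:
--         return list(items)
--     s = set(items)
--     bad = [x for x in wanted if x not in s]
--     if bad:
--         raise ValueError(f"Unknown x-axis item(s): {', '.join(bad)}")
--     out: list[str] = []
--     rest = wanted + items
--     while rest:
--         x = rest[0]
--         out.append(x)
--         rest = [y for y in rest[1:] if y != x]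
--     return out
-- ===== Notes on version B (the rewrite author's own statement) =====
-- stated objective: alternative
-- what changed: Replaced A's two accumulating passes with a shared 'seen' set by an iterative worklist nub: repeatedly emit the head of wanted+items and filter all its duplicates out of the remaining worklist, so no auxiliary set or second pass exists.
import Mathlib
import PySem

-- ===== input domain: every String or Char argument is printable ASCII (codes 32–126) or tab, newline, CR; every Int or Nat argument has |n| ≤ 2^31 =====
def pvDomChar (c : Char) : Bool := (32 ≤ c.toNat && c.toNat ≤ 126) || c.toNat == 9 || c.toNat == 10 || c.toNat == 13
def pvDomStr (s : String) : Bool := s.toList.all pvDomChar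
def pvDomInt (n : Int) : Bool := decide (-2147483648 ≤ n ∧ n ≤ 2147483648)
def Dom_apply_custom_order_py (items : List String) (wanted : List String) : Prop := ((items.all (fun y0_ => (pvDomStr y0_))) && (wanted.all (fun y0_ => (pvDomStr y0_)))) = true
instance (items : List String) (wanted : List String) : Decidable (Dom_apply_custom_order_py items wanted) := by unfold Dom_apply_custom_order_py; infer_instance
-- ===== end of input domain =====

-- B replaces A's two accumulating loops with a shared 'seen' set by an iterative worklist nub: emit the head of wanted+items, filter its duplicates out of the worklist, repeat (alternative decomposition; guard and validation unchanged).


-- ===== PORT A =====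
-- the body of A's two 'for' loops: append x to out and add it to seen when unseen
def pvStepA (p : List String × PySem.Set String) (x : String) : List String × PySem.Set String :=
  if PySem.Set.contains p.2 x then p else (p.1 ++ [x], PySem.Set.add p.2 x)

def apply_custom_order_py (items : List String) (wanted : List String) : List String :=
  if wanted = [] then items
  else
    let s := PySem.Set.ofList items
    let bad := wanted.filter (fun x => !(PySem.Set.contains s x))
    if bad ≠ [] then []  -- Python raises ValueError here; excluded by Pre_
    else
      let p1 := wanted.foldl pvStepA ([], PySem.Set.empty)
      let p2 := items.foldl pvStepA p1
      p2.1

-- ===== PORT B =====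
-- B's while loop: emit the head of the worklist, drop all its duplicates from the rest
def pvWorklist (l : List String) : List String :=
  match l with
  | [] => []
  | x :: xs => x :: pvWorklist (xs.filter (fun y => y ≠ x))
termination_by l.length
decreasing_by
  simp only [List.length_unattach, List.length_cons, Nat.lt_succ_iff]
  exact le_trans (List.length_filter_le _ _) (le_of_eq List.length_attach)

def apply_custom_order_py_alt (items : List String) (wanted : List String) : List String :=
  if wanted = [] then items
  else
    let s := PySem.Set.ofList items
    let bad := wanted.filter (fun x => !(PySem.Set.contains s x))
    if bad ≠ [] then []  -- Python raises ValueError here; excluded by Pre_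
    else pvWorklist (wanted ++ items)

-- ===== PRECONDITION & SPEC =====
-- Pre_ excludes exactly the inputs where A raises ValueError (some wanted element missing from items).
def Pre_apply_custom_order_py (items : List String) (wanted : List String) : Prop :=
  ∀ x ∈ wanted, x ∈ items
instance (items : List String) (wanted : List String) : Decidable (Pre_apply_custom_order_py items wanted) := by unfold Pre_apply_custom_order_py; infer_instance

def pvWitness_apply_custom_order_py : List String × List String := (["a", "b", "c"], ["b"])

def Spec_apply_custom_order_py (items : List String) (wanted : List String) (out : List String) : Prop := out = apply_custom_order_py_alt items wanted
instance (items : List String) (wanted : List String) (out : List String) : Decidable (Spec_apply_custom_order_py items wanted out) := by unfold Spec_apply_custom_order_py; infer_instance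

-- ===== CLAIM (what is proved, stated in full; the proofs are below) =====
def Claim_equal_apply_custom_order_py : Prop := ∀ (items : List String) (wanted : List String), Dom_apply_custom_order_py items wanted → Pre_apply_custom_order_py items wanted → Spec_apply_custom_order_py items wanted (apply_custom_order_py items wanted)

-- ===== LEMMAS AND PROOFS =====

-- A's loop keeps out = seen (both append x exactly when it is unseen), so the fold from (s, s) is the Set.add fold.
theorem pvStepA_diag (l : List String) (s : PySem.Set String) :
    l.foldl pvStepA (s, s) = (l.foldl PySem.Set.add s, l.foldl PySem.Set.add s) := by
  induction l generalizing s with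
  | nil => rfl
  | cons x xs ih =>
    simp only [List.foldl_cons, pvStepA]
    by_cases h : x ∈ s
    · rw [if_pos ((PySem.Set.contains_iff s x).mpr h), PySem.Set.add_of_mem h]
      exact ih s
    · rw [if_neg (fun hc => h ((PySem.Set.contains_iff s x).mp hc)), PySem.Set.add_of_not_mem h]
      exact ih (s ++ [x])

-- filtering out an element commutes with ordered dedup
theorem pvOfList_filter_ne (x : String) (l : List String) :
    PySem.Set.ofList (l.filter (fun y => y ≠ x)) = (PySem.Set.ofList l).filter (fun y => !(y == x)) := by
  induction l with
  | nil => rfl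
  | cons y ys ih =>
    by_cases h : y = x
    · subst h
      simp only [List.filter_cons, ne_eq, not_true_eq_false, decide_false, Bool.false_eq_true,
        if_false, ih, PySem.Set.ofList_cons, PySem.Set.discard, beq_self_eq_true, Bool.not_true,
        List.filter_filter, Bool.and_self]
    · simp only [List.filter_cons, ne_eq, h, not_false_eq_true, decide_true, if_true,
        PySem.Set.ofList_cons, ih, PySem.Set.discard,
        (by simpa using h : (y == x) = false), Bool.not_false, List.filter_filter]
      exact congrArg _ (List.filter_congr (fun a _ => Bool.and_comm _ _))

-- B's worklist nub computes the ordered dedup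
theorem pvWorklist_eq_ofList (l : List String) :
    pvWorklist l = PySem.Set.ofList l := by
  generalize hn : l.length = n
  induction n using Nat.strong_induction_on generalizing l with
  | _ n ih =>
    cases l with
    | nil => rw [pvWorklist.eq_def]; rfl
    | cons x xs =>
      rw [pvWorklist.eq_def]
      show x :: pvWorklist (xs.filter (fun y => y ≠ x)) = _
      have hlt : (xs.filter (fun y => y ≠ x)).length < n := by
        subst hn
        simpa [Nat.lt_succ_iff] using List.length_filter_le (fun y => decide (y ≠ x)) xs
      rw [ih _ hlt _ rfl, pvOfList_filter_ne, PySem.Set.ofList_cons]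
      simp [PySem.Set.discard]

-- ===== VERDICT (by name: the statement is the Claim_ definition above) =====
theorem apply_custom_order_py_spec : Claim_equal_apply_custom_order_py := by
  intro items wanted _ hpre
  unfold Spec_apply_custom_order_py apply_custom_order_py apply_custom_order_py_alt
  by_cases hw : wanted = []
  · simp [hw]
  · simp only [hw, if_false]
    have hbad : wanted.filter (fun x => !(PySem.Set.contains (PySem.Set.ofList items) x)) = [] := by
      rw [List.filter_eq_nil_iff]
      intro x hx
      simp [PySem.Set.mem_ofList]
      exact hpre x hx
    simp only [hbad, ne_eq, not_true_eq_false, if_false]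
    have h1 : wanted.foldl pvStepA ([], PySem.Set.empty)
        = (wanted.foldl PySem.Set.add [], wanted.foldl PySem.Set.add []) := pvStepA_diag wanted []
    rw [h1, pvStepA_diag, ← List.foldl_append]
    rw [pvWorklist_eq_ofList, PySem.Set.ofList_eq_foldl]
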